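-- pv_equiv track=rewrite | github.com/miliar/Code_Jam_Webscraper | solutions_python/Problem_201/684.py | find_used
-- ===== SOURCE A (Python) =====
-- def find_used(k):
--     pow = 0
--     required = 0
--     last_required = required
--     while required < k:
--         last_required = required
--         required += 2**pow
--         pow += 1
--     return last_required, 2**(pow-1)
-- ===== SOURCE B (Python) =====
-- def find_used(k):
--     # Closed form: after A's loop, pow equals k.bit_length() (for k >= 1),
--     # since the accumulated sum 1+2+...+2^(pow-1) = 2^pow - 1 first reaches k there.
--     n = k.bit_length()
--     return (2 ** (n - 1) - 1, 2 ** (n - 1))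
-- ===== Notes on version B (the rewrite author's own statement) =====
-- stated objective: simpler
-- what changed: Replaces A's geometric accumulation loop by a closed form: for positive k the loop's final pow equals k.bit_length(), so B returns the pair of powers of two directly. Pre_ excludes non-positive k, where A's loop never runs and it returns a float in the second component, not an integer result.
-- outside the precondition, e.g. on find_used(0): A returns (0, 0.5), B returns (-0.5, 0.5); on find_used(-3): A returns (0, 0.5), B returns (1, 2)
import Mathlib
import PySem

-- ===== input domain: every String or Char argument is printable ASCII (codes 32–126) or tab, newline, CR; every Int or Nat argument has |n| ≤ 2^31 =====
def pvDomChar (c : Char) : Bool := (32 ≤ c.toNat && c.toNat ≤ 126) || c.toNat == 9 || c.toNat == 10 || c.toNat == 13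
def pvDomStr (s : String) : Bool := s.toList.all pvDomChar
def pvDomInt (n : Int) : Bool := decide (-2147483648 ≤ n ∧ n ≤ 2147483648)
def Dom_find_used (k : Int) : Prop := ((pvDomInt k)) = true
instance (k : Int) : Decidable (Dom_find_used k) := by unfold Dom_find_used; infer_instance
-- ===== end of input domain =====

-- B replaces A's accumulation loop by a closed form via bit_length; proved equal on positive k (Pre_); for non-positive k A returns a float second component, excluded by Pre_.


-- ===== PORT A =====
-- A's while loop: state (pow, required, last_required); required grows by 2**pow each turn.
-- (Python's final 2**(pow-1) is a float when pow = 0, i.e. on non-positive k; those inputs are outside Pre_.)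
def findUsedLoop (k : Int) (pow required last_required : Int) : Int × Int :=
  if required < k then
    findUsedLoop k (pow + 1) (required + 2 ^ pow.toNat) required
  else
    (last_required, 2 ^ (pow - 1).toNat)
termination_by (k - required).toNat
decreasing_by
  have h1 : (0:Int) < 2 ^ pow.toNat := pow_pos (by norm_num) _
  omega

def find_used (k : Int) : Int × Int := findUsedLoop k 0 0 0

-- ===== PORT B =====
def find_used_alt (k : Int) : Int × Int :=
  let n := PySem.Int.bitLength k
  ((2:Int) ^ (n - 1) - 1, (2:Int) ^ (n - 1))

-- ===== PRECONDITION & SPEC =====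
-- Pre_ excludes non-positive k: there A's loop never runs and its second component is a
-- float, not a value of the declared integer-pair type.
def Pre_find_used (k : Int) : Prop := 1 ≤ k
instance (k : Int) : Decidable (Pre_find_used k) := by unfold Pre_find_used; infer_instance
def pvWitness_find_used : Int := 5

def Spec_find_used (k : Int) (out : Int × Int) : Prop := out = find_used_alt k
instance (k : Int) (out : Int × Int) : Decidable (Spec_find_used k out) := by unfold Spec_find_used; infer_instance

-- ===== CLAIM (what is proved, stated in full; the proofs are below) =====
def Claim_equal_find_used : Prop := ∀ (k : Int), Dom_find_used k → Pre_find_used k → Spec_find_used k (find_used k)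

-- ===== LEMMAS AND PROOFS =====

-- Running the loop from pow = p (1 ≤ p ≤ bitLength k) with required = 2^p - 1 and
-- last_required = 2^(p-1) - 1 ends with pow = bitLength k.
theorem findUsedLoop_run (k : Int) (hk : 1 ≤ k) :
    ∀ (d p : Nat), 1 ≤ p → p + d = PySem.Int.bitLength k →
      findUsedLoop k (p : Int) ((2:Int) ^ p - 1) ((2:Int) ^ (p - 1) - 1) =
        ((2:Int) ^ (PySem.Int.bitLength k - 1) - 1, (2:Int) ^ (PySem.Int.bitLength k - 1)) := by
  intro d
  induction d with
  | zero =>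
    intro p hp hpn
    have hn : p = PySem.Int.bitLength k := by omega
    have hlt : k.natAbs < 2 ^ PySem.Int.bitLength k := PySem.Int.lt_two_pow_bitLength k
    have hkk : k ≤ (2:Int) ^ p - 1 := by
      have hka : ((k.natAbs : Int)) = k := Int.natAbs_of_nonneg (by omega)
      have hlt' : ((k.natAbs : Int)) < ((2 ^ PySem.Int.bitLength k : Nat) : Int) := by exact_mod_cast hlt
      have hc : ((2 ^ PySem.Int.bitLength k : Nat) : Int) = (2:Int) ^ PySem.Int.bitLength k := by push_cast; ring
      rw [hka, hc] at hlt'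
      rw [hn]; omega
    rw [findUsedLoop]
    have hnotlt : ¬ ((2:Int) ^ p - 1 < k) := by omega
    rw [if_neg hnotlt]
    have htn : ((p : Int) - 1).toNat = p - 1 := by omega
    rw [htn, hn]
  | succ d ih =>
    intro p hp hpn
    have hk0 : k ≠ 0 := by omega
    have hle : 2 ^ (PySem.Int.bitLength k - 1) ≤ k.natAbs := PySem.Int.two_pow_bitLength_le k hk0
    have hple : (2:Int) ^ p ≤ k := by
      have h1 : 2 ^ p ≤ 2 ^ (PySem.Int.bitLength k - 1) := Nat.pow_le_pow_right (by norm_num) (by omega)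
      have h2 : ((2:Int) ^ p) ≤ ((k.natAbs : Int)) := by exact_mod_cast le_trans h1 hle
      omega
    rw [findUsedLoop]
    rw [if_pos (by omega)]
    have h1 : ((p:Int) + 1) = ((p + 1 : Nat) : Int) := by push_cast; ring
    have h2 : ((p:Int)).toNat = p := by omega
    have h3 : (2:Int) ^ p - 1 + 2 ^ p = (2:Int) ^ (p + 1) - 1 := by ring
    rw [h2, h1, h3]
    have h4 : (2:Int) ^ (p + 1 - 1) - 1 = (2:Int) ^ p - 1 := by norm_num
    rw [← h4]
    exact ih (p + 1) (by omega) (by omega)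

-- ===== VERDICT (by name: the statement is the Claim_ definition above) =====
theorem find_used_spec : Claim_equal_find_used := by
  intro k _ hk
  unfold Spec_find_used find_used find_used_alt
  have hk0 : k ≠ 0 := by
    unfold Pre_find_used at hk; omega
  have hk1 : (1:Int) ≤ k := hk
  have hn1 : 1 ≤ PySem.Int.bitLength k := by
    by_contra h
    have h0 : PySem.Int.bitLength k = 0 := by omega
    have := PySem.Int.lt_two_pow_bitLength k
    rw [h0] at this
    simp at this
    omega
  rw [findUsedLoop]
  rw [if_pos (by omega)]
  have e1 : ((0:Int) + 1) = ((1:Nat) : Int) := by norm_num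
  have e2 : (0:Int) + 2 ^ (0:Int).toNat = (2:Int) ^ (1:Nat) - 1 := by norm_num
  have e3 : (0:Int) = (2:Int) ^ ((1:Nat) - 1) - 1 := by norm_num
  rw [e1, e2]
  conv_lhs => rw [e3]
  exact findUsedLoop_run k hk1 (PySem.Int.bitLength k - 1) 1 (le_refl 1) (by omega)
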